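-- pv_equiv track=rewrite | github.com/ayyubxonmashrapov-cmyk/homework | 12uy_ishi/1.py | yigindi
-- ===== SOURCE A (Python) =====
-- def yigindi(tpl: tuple) -> int:                                   #1
--     if tpl == ():
--         return 0
--
--     a = tpl[0]
--     if a % 2 == 0:
--         return a + yigindi(tpl[1:])
--     else:
--         return yigindi(tpl[1:])
-- ===== SOURCE B (Python) =====
-- def yigindi(tpl: tuple) -> int:
--     total = 0
--     for x in tpl:
--         if x % 2 == 0:
--             total += x
--     return total
-- ===== Notes on version B (the rewrite author's own statement) =====
-- stated objective: simpler
-- what changed: Replaces the recursion on tpl[1:] (which copies the tail at each step) with a single iterative pass keeping a running total.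
import Mathlib
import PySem

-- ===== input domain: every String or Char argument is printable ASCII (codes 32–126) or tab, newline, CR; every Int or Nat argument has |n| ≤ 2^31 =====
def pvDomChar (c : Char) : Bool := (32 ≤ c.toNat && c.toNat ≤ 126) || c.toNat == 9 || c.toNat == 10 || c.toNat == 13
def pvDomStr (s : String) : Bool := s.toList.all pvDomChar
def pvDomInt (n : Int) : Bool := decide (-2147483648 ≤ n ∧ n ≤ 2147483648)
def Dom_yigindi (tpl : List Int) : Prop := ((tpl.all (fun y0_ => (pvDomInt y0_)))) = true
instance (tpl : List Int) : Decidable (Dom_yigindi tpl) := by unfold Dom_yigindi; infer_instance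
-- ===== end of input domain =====

-- B replaces A's recursion on tpl[1:] with one iterative pass over a running total (simpler).


-- ===== PORT A =====
-- recursion on the head, mirroring `yigindi(tpl[1:])`; Python `%` ported by PySem.Int.mod
def yigindi (tpl : List Int) : Int :=
  match tpl with
  | [] => 0
  | a :: rest =>
    if PySem.Int.mod a 2 = 0 then a + yigindi rest
    else yigindi rest

-- ===== PORT B =====
-- iterative accumulator: total = 0; for x in tpl: if x % 2 == 0: total += x
def yigindi_alt (tpl : List Int) : Int :=
  tpl.foldl (fun total x => if PySem.Int.mod x 2 = 0 then total + x else total) 0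

-- ===== PRECONDITION & SPEC =====
def Spec_yigindi (tpl : List Int) (out : Int) : Prop := out = yigindi_alt tpl
instance (tpl : List Int) (out : Int) : Decidable (Spec_yigindi tpl out) := by unfold Spec_yigindi; infer_instance

-- ===== CLAIM (what is proved, stated in full; the proofs are below) =====
def Claim_equal_yigindi : Prop := ∀ (tpl : List Int), Dom_yigindi tpl → Spec_yigindi tpl (yigindi tpl)

-- ===== LEMMAS AND PROOFS =====
theorem yigindi_alt_acc (tpl : List Int) (acc : Int) :
    tpl.foldl (fun total x => if PySem.Int.mod x 2 = 0 then total + x else total) acc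
      = acc + yigindi tpl := by
  induction tpl generalizing acc with
  | nil => simp [yigindi]
  | cons a rest ih =>
    simp only [List.foldl, yigindi]
    split_ifs with h <;> rw [ih] <;> ring

-- ===== VERDICT (by name: the statement is the Claim_ definition above) =====
theorem yigindi_spec : Claim_equal_yigindi := by
  intro tpl _
  unfold Spec_yigindi yigindi_alt
  rw [yigindi_alt_acc]
  ring
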